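-- pv_equiv track=rewrite | github.com/dcafplz/AlgorithmStudy | 2.Algorithm/07.Greedy/신입 사원(01946)/신입사원(01946).py | f
-- ===== SOURCE A (Python) =====
-- def f(ranks):
--     t = ranks[0][1]
--     cnt = 1
--     for i in range(1, len(ranks)):
--         if ranks[i][1] < t:
--             t = ranks[i][1]
--             cnt += 1
--     return cnt
-- ===== SOURCE B (Python) =====
-- def f(ranks):
--     seconds = [r[1] for r in ranks]
--     mins = [min(seconds[: i + 1]) for i in range(len(seconds))]
--     return len(set(mins))
-- ===== Notes on version B (the rewrite author's own statement) =====
-- stated objective: alternative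
-- what changed: Replaces A's single inline loop that counts strict improvements of a running minimum with a two-pass scheme: build the table of prefix minima of the second coordinates, then return the number of distinct values in that table (len(set(...))).
import Mathlib
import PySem

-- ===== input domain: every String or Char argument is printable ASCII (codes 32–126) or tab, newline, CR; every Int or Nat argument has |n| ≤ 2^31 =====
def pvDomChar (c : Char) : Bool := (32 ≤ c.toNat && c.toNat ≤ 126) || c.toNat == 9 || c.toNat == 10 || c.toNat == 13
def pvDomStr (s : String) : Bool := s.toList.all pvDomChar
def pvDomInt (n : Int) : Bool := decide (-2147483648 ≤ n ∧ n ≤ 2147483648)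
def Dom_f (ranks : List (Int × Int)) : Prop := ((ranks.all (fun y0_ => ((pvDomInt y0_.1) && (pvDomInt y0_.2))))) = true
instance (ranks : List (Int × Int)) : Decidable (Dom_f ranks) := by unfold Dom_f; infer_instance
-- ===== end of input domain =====

-- B builds the table of prefix minima of the second coordinates and returns the number of
-- distinct values in it, instead of A's inline running-min transition counter (alternative
-- decomposition, not claimed faster). On [] A raises IndexError (excluded by Pre_f); B returns 0.

-- ===== PORT A =====
def f (ranks : List (Int × Int)) : Int :=
  match PySem.List.pyGet? ranks 0 with
  | none => 0   -- ranks[0] raises IndexError in Python; excluded by Pre_f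
  | some r0 =>
    let st := (PySem.List.pyRange 1 (PySem.List.len ranks) 1).foldl
      (fun (st : Int × Int) i =>
        let ri := PySem.List.pyGetD ranks i (0, 0)   -- i ∈ range(1, len), always in range
        if ri.2 < st.1 then (ri.2, st.2 + 1) else st)
      (r0.2, 1)
    st.2

-- ===== PORT B =====
def f_alt (ranks : List (Int × Int)) : Int :=
  let seconds := ranks.map (fun r => r.2)
  let mins := (PySem.List.pyRange 0 (PySem.List.len seconds) 1).map
    (fun i =>
      -- min(seconds[:i+1]): the slice is nonempty for every i in range(len), so min never raises
      (PySem.List.min? (PySem.List.slice seconds (some 0) (some (i + 1))) (fun x => x)).getD 0)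
  Int.ofNat (PySem.Set.ofList mins).length

-- ===== PRECONDITION & SPEC =====
-- Pre_f excludes exactly the empty list, on which A raises IndexError (ranks[0]).
def Pre_f (ranks : List (Int × Int)) : Prop := ranks ≠ []
instance (ranks : List (Int × Int)) : Decidable (Pre_f ranks) := by unfold Pre_f; infer_instance
def pvWitness_f : (List (Int × Int)) := [(1, 3), (2, 2), (3, 4)]

def Spec_f (ranks : List (Int × Int)) (out : Int) : Prop := out = f_alt ranks
instance (ranks : List (Int × Int)) (out : Int) : Decidable (Spec_f ranks out) := by unfold Spec_f; infer_instance

-- ===== CLAIM (what is proved, stated in full; the proofs are below) =====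
def Claim_equal_f : Prop := ∀ (ranks : List (Int × Int)), Dom_f ranks → Pre_f ranks → Spec_f ranks (f ranks)

-- ===== LEMMAS AND PROOFS =====

-- number of strict improvements of the running minimum t along the list
def pvImp (t : Int) : List Int → Int
  | [] => 0
  | x :: xs => if x < t then 1 + pvImp x xs else pvImp t xs

-- the prefix-minima list starting from current minimum t
def pvPM (t : Int) : List Int → List Int
  | [] => [t]
  | x :: xs => t :: pvPM (min t x) xs

theorem pvPM_mem_le (t : Int) (xs : List Int) : ∀ y ∈ pvPM t xs, y ≤ t := by
  induction xs generalizing t with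
  | nil => simp [pvPM]
  | cons x xs ih =>
    intro y hy
    simp only [pvPM, List.mem_cons] at hy
    rcases hy with h | h
    · omega
    · have := ih (min t x) y h
      omega

theorem pvPM_head_mem (t : Int) (xs : List Int) : t ∈ pvPM t xs := by
  cases xs <;> simp [pvPM]

theorem ofList_toFinset {α : Type} [DecidableEq α] (xs : List α) :
    (PySem.Set.ofList xs).toFinset = xs.toFinset := by
  ext y; simp [List.mem_toFinset, PySem.Set.mem_ofList]

theorem ofList_length_eq_card {α : Type} [DecidableEq α] (xs : List α) :
    (PySem.Set.ofList xs).length = xs.toFinset.card := by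
  rw [← ofList_toFinset, List.toFinset_card_of_nodup (PySem.Set.nodup_ofList xs)]

-- the distinct-count of the prefix-minima list is 1 + number of strict improvements
theorem card_pvPM (t : Int) (xs : List Int) :
    ((pvPM t xs).toFinset.card : Int) = 1 + pvImp t xs := by
  induction xs generalizing t with
  | nil => simp [pvPM, pvImp]
  | cons x xs ih =>
    simp only [pvPM, pvImp, List.toFinset_cons]
    by_cases hx : x < t
    · have hmin : min t x = x := by omega
      have hnot : t ∉ (pvPM x xs).toFinset := by
        simp only [List.mem_toFinset]
        intro hmem
        have := pvPM_mem_le x xs t hmem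
        omega
      rw [hmin, Finset.card_insert_of_notMem hnot, if_pos hx, ← ih x]
      push_cast; ring
    · have hmin : min t x = t := by omega
      have hmem : t ∈ (pvPM t xs).toFinset := by
        simp only [List.mem_toFinset]; exact pvPM_head_mem t xs
      rw [hmin, Finset.card_insert_of_mem hmem, if_neg hx, ← ih t]

-- A's loop over the tail computes (final min, 1 + improvements); we only need the count
theorem foldA (rs : List (Int × Int)) (t c : Int) :
    (rs.foldl (fun (st : Int × Int) r => if r.2 < st.1 then (r.2, st.2 + 1) else st) (t, c)).2
      = c + pvImp t (rs.map (fun r => r.2)) := by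
  induction rs generalizing t c with
  | nil => simp [pvImp]
  | cons r rs ih =>
    simp only [List.foldl_cons, List.map_cons, pvImp]
    by_cases h : r.2 < t
    · rw [if_pos h, if_pos h, ih]; ring
    · rw [if_neg h, if_neg h, ih]

-- B's table of prefix minima is pvPM
theorem mins_eq_pvPM (t : Int) (rest : List Int) :
    (List.range (rest.length + 1)).map
        (fun k => ((t :: rest).take (k + 1)).foldl min t)
      = pvPM t rest := by
  induction rest generalizing t with
  | nil => simp [pvPM]
  | cons x xs ih =>
    rw [List.range_succ_eq_map]
    simp only [List.map_cons, List.map_map, pvPM]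
    congr 1
    · simp
    · rw [← ih (min t x)]
      apply List.map_congr_left
      intro k hk
      simp only [Function.comp]
      have : (t :: x :: xs).take (k + 1 + 1) = t :: (x :: xs).take (k + 1) := rfl
      rw [this]
      simp only [List.foldl_cons]
      have : (x :: xs).take (k + 1) = x :: xs.take k := rfl
      rw [this]
      simp [List.foldl_cons, min_self]

theorem min_take_eq (t : Int) (rest : List Int) (k : ℕ) :
    (PySem.List.min? ((t :: rest).take (k + 1)) (fun x => x)).getD 0
      = ((t :: rest).take (k + 1)).foldl min t := by
  have h : (t :: rest).take (k + 1) = t :: rest.take k := rfl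
  rw [h, PySem.List.min?_id_cons]
  simp [List.foldl_cons, min_self]

theorem map_mins (t : Int) (rest : List Int) :
    (List.range (rest.length + 1)).map
      (fun k : ℕ =>
        (PySem.List.min? (PySem.List.slice (t :: rest) none (some ((0 : Int) + ↑k + 1)))
          (fun x => x)).getD 0)
      = pvPM t rest := by
  have h : ∀ k ∈ List.range (rest.length + 1),
      (PySem.List.min? (PySem.List.slice (t :: rest) none (some ((0 : Int) + ↑k + 1)))
          (fun x => x)).getD 0
        = ((t :: rest).take (k + 1)).foldl min t := by
    intro k hk
    have h0 : ((0 : Int) + ↑k + 1) = ((k + 1 : ℕ) : Int) := by push_cast; ring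
    rw [h0, PySem.List.slice_to_natCast]
    exact min_take_eq t rest k
  rw [List.map_congr_left h, mins_eq_pvPM]

-- ===== VERDICT (by name: the statement is the Claim_ definition above) =====
theorem f_spec : Claim_equal_f := by
  intro ranks _ hpre
  unfold Spec_f f f_alt
  match ranks with
  | [] => exact absurd rfl hpre
  | r :: rs =>
    rw [PySem.List.pyGet?_zero_cons]
    simp only [PySem.List.len_eq]
    rw [PySem.List.foldl_pyRange_pyGetD' (xs := r :: rs) (d := ((0 : Int), (0 : Int)))
        (f := fun (st : Int × Int) ri => if ri.2 < st.1 then (ri.2, st.2 + 1) else st)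
        (init := (r.2, 1)) (a := 1) (by norm_num)]
    norm_num [List.drop_one]
    rw [foldA]
    -- B side: turn the pyRange/slice table into pvPM and count distinct values
    have hcast : ((rs.length : Int) + 1) = ((rs.length + 1 : ℕ) : Int) := by push_cast; ring
    rw [PySem.List.pyRange_one, sub_zero, hcast, Int.toNat_natCast, List.map_map]
    simp only [Function.comp_def]
    have hlen : (rs.map (fun r => r.2)).length = rs.length := by simp
    rw [show rs.length + 1 = (rs.map (fun r => r.2)).length + 1 from by rw [hlen],
        map_mins, ofList_length_eq_card]
    have := card_pvPM r.2 (rs.map (fun r => r.2))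
    omega
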